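-- pv_equiv track=rewrite | github.com/greenstar1151/Baekjoon | 7576_토마토/7576_토마토_250304.py | solution
-- ===== SOURCE A (Python) =====
-- from collections import deque
--
-- def get_next_moves(n: int, m: int, x: int, y: int):
--     MOVES = [(0, 1), (-1, 0), (0, -1), (1, 0)]
--
--     return tuple(
--         filter(
--             lambda pos: 0 <= pos[0] < n and 0 <= pos[1] < m,
--             [(x + dx, y + dy) for dx, dy in MOVES],
--         )
--     )
--
-- def solution(n: int, m: int, grid: list[list[int]]):
--     visited = [[False] * m for _ in range(n)]
--     q: deque[tuple[int, tuple[int, int]]] = deque()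
--
--     for i in range(n):
--         for j in range(m):
--             if grid[i][j] == -1:
--                 visited[i][j] = True
--             elif grid[i][j] == 1:
--                 visited[i][j] = True
--                 q.append((0, (i, j)))
--     max_depth = 0
--     while q:
--         depth, pos = q.popleft()
--         x, y = pos
--         for next_pos in get_next_moves(n, m, x, y):
--             nx, ny = next_pos
--             if visited[nx][ny]:
--                 continue
--             max_depth = max(max_depth, depth + 1)
--             visited[nx][ny] = True
--             q.append((depth + 1, (nx, ny)))
--
--     if not all(all(row) for row in visited):
--         return -1
--     return max_depth
-- ===== SOURCE B (Python) =====
-- def solution(n: int, m: int, grid: list[list[int]]):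
--     # Level-synchronous BFS: frontier lists per day + an unripe counter
--     # instead of a deque of (depth, pos) tuples and a final all()-scan.
--     seen = [[grid[i][j] == 1 or grid[i][j] == -1 for j in range(m)] for i in range(n)]
--     frontier = [(i, j) for i in range(n) for j in range(m) if grid[i][j] == 1]
--     unripe = sum(1 for i in range(n) for j in range(m)
--                  if grid[i][j] != 1 and grid[i][j] != -1)
--     days = 0
--     while frontier:
--         nxt = []
--         for x, y in frontier:
--             for nx, ny in ((x, y + 1), (x - 1, y), (x, y - 1), (x + 1, y)):
--                 if 0 <= nx < n and 0 <= ny < m and not seen[nx][ny]: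
--                     seen[nx][ny] = True
--                     unripe -= 1
--                     nxt.append((nx, ny))
--         if not nxt:
--             break
--         frontier = nxt
--         days += 1
--     return -1 if unripe else days
-- ===== Notes on version B (the rewrite author's own statement) =====
-- stated objective: alternative
-- what changed: Replaces A's deque BFS of (depth,pos) tuples with a running max-depth and a final all()-scan of visited by a level-synchronous BFS: one initial grid scan builds the ripe frontier, a seen matrix and an unripe counter, then whole frontiers are expanded day by day, so depth is tracked by level boundaries and the -1 check is a counter test instead of a full rescan.
import Mathlib
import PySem

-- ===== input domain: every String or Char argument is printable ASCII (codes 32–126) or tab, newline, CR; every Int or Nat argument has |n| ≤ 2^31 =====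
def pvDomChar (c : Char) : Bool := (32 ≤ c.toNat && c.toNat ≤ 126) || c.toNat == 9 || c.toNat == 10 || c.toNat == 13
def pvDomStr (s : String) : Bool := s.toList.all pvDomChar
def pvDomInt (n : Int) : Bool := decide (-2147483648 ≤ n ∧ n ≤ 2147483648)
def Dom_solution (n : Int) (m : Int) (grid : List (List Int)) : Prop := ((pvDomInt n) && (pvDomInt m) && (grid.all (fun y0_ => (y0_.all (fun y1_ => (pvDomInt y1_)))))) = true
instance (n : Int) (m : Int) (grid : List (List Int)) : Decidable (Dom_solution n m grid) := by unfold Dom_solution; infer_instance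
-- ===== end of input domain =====

-- B re-implements A's per-node (depth,pos) deque BFS as a level-synchronous
-- frontier BFS with an unripe counter (objective: alternative decomposition,
-- same asymptotic cost); equal return value on every input A accepts.

-- ===== PORT A =====
-- shared low-level helpers: 2-D indexing (indices are in range under Pre_, so getD is exact there)
def cellAt (grid : List (List Int)) (i j : Int) : Int := (grid.getD i.toNat []).getD j.toNat 0
def vget (v : List (List Bool)) (x y : Int) : Bool := (v.getD x.toNat []).getD y.toNat false
def vset (v : List (List Bool)) (x y : Int) : List (List Bool) :=
  v.set x.toNat ((v.getD x.toNat []).set y.toNat true)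
def countFalse (v : List (List Bool)) : Nat := (v.map (fun r => r.count false)).sum

-- get_next_moves of A
def nextMoves (n m x y : Int) : List (Int × Int) :=
  ([(x, y + 1), (x - 1, y), (x, y - 1), (x + 1, y)]).filter
    (fun p => decide (0 ≤ p.1) && decide (p.1 < n) && decide (0 ≤ p.2) && decide (p.2 < m))

-- A's while-loop over the deque of (depth, (x, y)); fuel is only a totality
-- guard (one unit per popped element; the chosen fuel is exactly the number of
-- pops that can ever happen: initial queue + one per still-unvisited cell)
def bfsA (n m : Int) : Nat → List (Int × Int × Int) → List (List Bool) → Int → List (List Bool) × Int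
  | 0, _, v, md => (v, md)
  | _ + 1, [], v, md => (v, md)
  | fuel + 1, e :: q, v, md =>
      let st := (nextMoves n m e.2.1 e.2.2).foldl
        (fun (st : List (Int × Int × Int) × List (List Bool) × Int) np =>
          if vget st.2.1 np.1 np.2 then st
          else (st.1 ++ [(e.1 + 1, np.1, np.2)], vset st.2.1 np.1 np.2, max st.2.2 (e.1 + 1)))
        (q, v, md)
      bfsA n m fuel st.1 st.2.1 st.2.2

def solution (n : Int) (m : Int) (grid : List (List Int)) : Int :=
  let init : List (List Bool) × List (Int × Int × Int) :=
    (PySem.List.pyRange 0 n 1).foldl (fun st i =>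
      (PySem.List.pyRange 0 m 1).foldl
        (fun (st : List (List Bool) × List (Int × Int × Int)) j =>
          if cellAt grid i j == -1 then (vset st.1 i j, st.2)
          else if cellAt grid i j == 1 then (vset st.1 i j, st.2 ++ [(0, i, j)])
          else st) st)
      (List.replicate n.toNat (List.replicate m.toNat false), [])
  let r := bfsA n m (init.2.length + countFalse init.1) init.2 init.1 0
  if r.1.all (fun row => row.all id) then r.2 else -1

-- ===== PORT B =====
-- the three initial comprehensions of Source B
def seenInit (n m : Int) (grid : List (List Int)) : List (List Bool) :=
  (PySem.List.pyRange 0 n 1).map (fun i =>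
    (PySem.List.pyRange 0 m 1).map (fun j => cellAt grid i j == 1 || cellAt grid i j == -1))
def frontInit (n m : Int) (grid : List (List Int)) : List (Int × Int) :=
  (PySem.List.pyRange 0 n 1).flatMap (fun i =>
    ((PySem.List.pyRange 0 m 1).filter (fun j => cellAt grid i j == 1)).map (fun j => (i, j)))
def unripeInit (n m : Int) (grid : List (List Int)) : Int :=
  ((PySem.List.pyRange 0 n 1).map (fun i =>
    (((PySem.List.pyRange 0 m 1).filter
        (fun j => !(cellAt grid i j == 1 || cellAt grid i j == -1))).length : Int))).sum

-- Source B's while-loop over day frontiers (fuel is only a totality guard: the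
-- loop repeats only when at least one cell got marked, so #unseen + 1 suffices)
def bfsB (n m : Int) : Nat → List (Int × Int) → List (List Bool) → Int → Int → Int × Int
  | 0, _, _, days, unripe => (days, unripe)
  | fuel + 1, frontier, seen, days, unripe =>
    match frontier with
    | [] => (days, unripe)
    | _ :: _ =>
      let st := frontier.foldl
        (fun (st : List (Int × Int) × List (List Bool) × Int) p =>
          ([(p.1, p.2 + 1), (p.1 - 1, p.2), (p.1, p.2 - 1), (p.1 + 1, p.2)]).foldl
            (fun (st : List (Int × Int) × List (List Bool) × Int) np =>
              if decide (0 ≤ np.1) && decide (np.1 < n) && decide (0 ≤ np.2) && decide (np.2 < m)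
                  && !(vget st.2.1 np.1 np.2)
              then (st.1 ++ [np], vset st.2.1 np.1 np.2, st.2.2 - 1)
              else st) st)
        ([], seen, unripe)
      match st.1 with
      | [] => (days, st.2.2)
      | _ :: _ => bfsB n m fuel st.1 st.2.1 (days + 1) st.2.2

def solution_alt (n : Int) (m : Int) (grid : List (List Int)) : Int :=
  let seen := seenInit n m grid
  let r := bfsB n m (countFalse seen + 1) (frontInit n m grid) seen 0 (unripeInit n m grid)
  if r.2 == 0 then r.1 else -1

-- ===== PRECONDITION & SPEC =====
-- Pre_ excludes exactly the inputs where Python A raises IndexError: when both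
-- loops run (0 < n and 0 < m), the grid must have at least n rows whose first
-- n rows each have at least m entries.
def Pre_solution (n : Int) (m : Int) (grid : List (List Int)) : Prop :=
  n ≤ 0 ∨ m ≤ 0 ∨ (n ≤ (grid.length : Int) ∧ ∀ row ∈ grid.take n.toNat, m ≤ (row.length : Int))
instance (n : Int) (m : Int) (grid : List (List Int)) : Decidable (Pre_solution n m grid) := by
  unfold Pre_solution; infer_instance

def pvWitness_solution : Int × Int × List (List Int) := (2, 3, [[1, 0, -1], [0, 0, 0]])

def Spec_solution (n : Int) (m : Int) (grid : List (List Int)) (out : Int) : Prop := out = solution_alt n m grid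
instance (n : Int) (m : Int) (grid : List (List Int)) (out : Int) : Decidable (Spec_solution n m grid out) := by unfold Spec_solution; infer_instance

-- ===== CLAIM (what is proved, stated in full; the proofs are below) =====
def Claim_equal_solution : Prop := ∀ (n : Int) (m : Int) (grid : List (List Int)), Dom_solution n m grid → Pre_solution n m grid → Spec_solution n m grid (solution n m grid)

-- ===== LEMMAS AND PROOFS =====

-- one-cell expansion: mark-and-collect the not-yet-seen cells of a move list
def expandList : List (Int × Int) → List (List Bool) → List (Int × Int) × List (List Bool)
  | [], v => ([], v)
  | np :: ms, v =>
    if vget v np.1 np.2 then expandList ms v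
    else
      let r := expandList ms (vset v np.1 np.2)
      (np :: r.1, r.2)

-- one-level expansion over a whole frontier
def expandFrontier (n m : Int) : List (Int × Int) → List (List Bool) → List (Int × Int) × List (List Bool)
  | [], v => ([], v)
  | p :: L, v =>
    let c := expandList (nextMoves n m p.1 p.2) v
    let r := expandFrontier n m L c.2
    (c.1 ++ r.1, r.2)


-- A's inner for-loop over the moves of one node, as expandList
theorem foldA_eq (d : Int) : ∀ (ms : List (Int × Int)) (q : List (Int × Int × Int)) (v : List (List Bool)) (md : Int),
    ms.foldl (fun (st : List (Int × Int × Int) × List (List Bool) × Int) np =>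
        if vget st.2.1 np.1 np.2 then st
        else (st.1 ++ [(d + 1, np.1, np.2)], vset st.2.1 np.1 np.2, max st.2.2 (d + 1)))
      (q, v, md)
    = (q ++ (expandList ms v).1.map (fun p => (d + 1, p.1, p.2)), (expandList ms v).2,
       if (expandList ms v).1 = [] then md else max md (d + 1)) := by
  intro ms
  induction ms with
  | nil => intro q v md; simp [expandList]
  | cons np ms ih =>
    intro q v md
    by_cases h : vget v np.1 np.2 = true
    · simp [expandList, h, List.foldl_cons, ih]
    · simp only [Bool.not_eq_true] at h
      simp only [List.foldl_cons, h, Bool.false_eq_true, if_false, expandList, ih]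
      refine Prod.ext ?_ (Prod.ext rfl ?_)
      · simp
      · split <;> simp


-- B's inner for-loop over the four raw candidate moves of one cell, as expandList of the filtered list
theorem foldB_eq (n m : Int) : ∀ (cand : List (Int × Int)) (acc : List (Int × Int)) (v : List (List Bool)) (u : Int),
    cand.foldl (fun (st : List (Int × Int) × List (List Bool) × Int) np =>
        if decide (0 ≤ np.1) && decide (np.1 < n) && decide (0 ≤ np.2) && decide (np.2 < m)
            && !(vget st.2.1 np.1 np.2)
        then (st.1 ++ [np], vset st.2.1 np.1 np.2, st.2.2 - 1)
        else st) (acc, v, u)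
    = (acc ++ (expandList (cand.filter (fun p => decide (0 ≤ p.1) && decide (p.1 < n) && decide (0 ≤ p.2) && decide (p.2 < m))) v).1,
       (expandList (cand.filter (fun p => decide (0 ≤ p.1) && decide (p.1 < n) && decide (0 ≤ p.2) && decide (p.2 < m))) v).2,
       u - ((expandList (cand.filter (fun p => decide (0 ≤ p.1) && decide (p.1 < n) && decide (0 ≤ p.2) && decide (p.2 < m))) v).1.length : Int)) := by
  intro cand
  induction cand with
  | nil => intro acc v u; simp [expandList]
  | cons np cand ih =>
    intro acc v u
    by_cases hb : (decide (0 ≤ np.1) && decide (np.1 < n) && decide (0 ≤ np.2) && decide (np.2 < m)) = true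
    · by_cases h : vget v np.1 np.2 = true
      · rw [List.foldl_cons]
        simp only []
        rw [if_neg (by simp [h]), ih]
        simp [List.filter_cons, hb, expandList, h]
      · simp only [Bool.not_eq_true] at h
        rw [List.foldl_cons]
        simp only []
        rw [if_pos (by simp [hb, h]), ih]
        simp [List.filter_cons, hb, expandList, h, List.append_assoc]
        push_cast; ring
    · simp only [Bool.not_eq_true] at hb
      rw [List.foldl_cons]
      simp only []
      rw [if_neg (by simp [hb]), ih]
      simp [List.filter_cons, hb]


-- B's outer for-loop over one frontier, as expandFrontier
theorem foldBF_eq (n m : Int) : ∀ (L : List (Int × Int)) (acc : List (Int × Int)) (v : List (List Bool)) (u : Int),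
    L.foldl (fun (st : List (Int × Int) × List (List Bool) × Int) p =>
        ([(p.1, p.2 + 1), (p.1 - 1, p.2), (p.1, p.2 - 1), (p.1 + 1, p.2)]).foldl
          (fun (st : List (Int × Int) × List (List Bool) × Int) np =>
            if decide (0 ≤ np.1) && decide (np.1 < n) && decide (0 ≤ np.2) && decide (np.2 < m)
                && !(vget st.2.1 np.1 np.2)
            then (st.1 ++ [np], vset st.2.1 np.1 np.2, st.2.2 - 1)
            else st) st) (acc, v, u)
    = (acc ++ (expandFrontier n m L v).1, (expandFrontier n m L v).2,
       u - ((expandFrontier n m L v).1.length : Int)) := by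
  intro L
  induction L with
  | nil => intro acc v u; simp [expandFrontier]
  | cons p L ih =>
    intro acc v u
    rw [List.foldl_cons, foldB_eq, ih]
    simp [expandFrontier, nextMoves, List.append_assoc]
    push_cast; ring


-- one whole BFS level of A: the queue holds level d then level d+1; processing
-- all level-d entries expands the frontier and shifts everything to level d+1
theorem bfsA_level (n m : Int) : ∀ (L1 : List (Int × Int)) (fa : Nat) (L2 : List (Int × Int)) (v : List (List Bool)) (d : Int),
    L1.length ≤ fa →
    bfsA n m fa (L1.map (fun p => (d, p.1, p.2)) ++ L2.map (fun p => (d + 1, p.1, p.2))) v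
      (if L2 = [] then d else d + 1)
    = bfsA n m (fa - L1.length)
        ((L2 ++ (expandFrontier n m L1 v).1).map (fun p => (d + 1, p.1, p.2)))
        (expandFrontier n m L1 v).2
        (if L2 ++ (expandFrontier n m L1 v).1 = [] then d else d + 1) := by
  intro L1
  induction L1 with
  | nil => intro fa L2 v d _; simp [expandFrontier]
  | cons p L1 ih =>
    intro fa L2 v d hfa
    obtain ⟨f, rfl⟩ : ∃ f, fa = f + 1 := ⟨fa - 1, by simp at hfa; omega⟩
    rw [List.map_cons, List.cons_append]
    simp only [bfsA]
    rw [foldA_eq d (nextMoves n m p.1 p.2) (L1.map (fun p => (d, p.1, p.2)) ++ L2.map (fun p => (d + 1, p.1, p.2))) v (if L2 = [] then d else d + 1)]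
    simp only []
    have hmd : (if (expandList (nextMoves n m p.1 p.2) v).1 = [] then (if L2 = [] then d else d + 1)
        else max (if L2 = [] then d else d + 1) (d + 1))
        = (if L2 ++ (expandList (nextMoves n m p.1 p.2) v).1 = [] then d else d + 1) := by
      rcases L2 with _ | _ <;> rcases hc : (expandList (nextMoves n m p.1 p.2) v).1 with _ | _ <;>
        simp [hc] <;> omega
    rw [hmd]
    have hq : L1.map (fun p => (d, p.1, p.2)) ++ L2.map (fun p => (d + 1, p.1, p.2))
        ++ (expandList (nextMoves n m p.1 p.2) v).1.map (fun p => (d + 1, p.1, p.2))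
        = L1.map (fun p => (d, p.1, p.2)) ++ (L2 ++ (expandList (nextMoves n m p.1 p.2) v).1).map (fun p => (d + 1, p.1, p.2)) := by
      simp [List.append_assoc]
    rw [hq, ih f (L2 ++ (expandList (nextMoves n m p.1 p.2) v).1) (expandList (nextMoves n m p.1 p.2) v).2 d (by simp at hfa ⊢; omega)]
    simp [expandFrontier, List.append_assoc]


-- bookkeeping: grid shape and the count of still-unseen cells
def shapeV (n m : Int) (v : List (List Bool)) : Prop :=
  v.length = n.toNat ∧ ∀ r ∈ v, r.length = m.toNat

theorem countFalse_cons (r : List Bool) (t : List (List Bool)) :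
    countFalse (r :: t) = r.count false + countFalse t := by simp [countFalse]

theorem count_set_false (r : List Bool) : ∀ j : Nat, j < r.length → r.getD j false = false →
    (r.set j true).count false + 1 = r.count false := by
  induction r with
  | nil => simp
  | cons b t ih =>
    intro j hj hg
    cases j with
    | zero => simp only [List.getD_cons_zero] at hg; subst hg; simp [List.count_cons]
    | succ j =>
      simp only [List.getD_cons_succ] at hg
      simp only [List.set_cons_succ, List.count_cons]
      have := ih j (by simp at hj; omega) hg
      omega

theorem countFalse_setrow (v : List (List Bool)) : ∀ i j : Nat, i < v.length →
    j < (v.getD i []).length → (v.getD i []).getD j false = false →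
    countFalse (v.set i ((v.getD i []).set j true)) + 1 = countFalse v := by
  induction v with
  | nil => simp
  | cons r t ih =>
    intro i j hi hj hg
    cases i with
    | zero =>
      simp only [List.getD_cons_zero] at hj hg ⊢
      simp only [List.set_cons_zero, countFalse_cons]
      have := count_set_false r j hj hg
      omega
    | succ i =>
      simp only [List.getD_cons_succ] at hj hg ⊢
      simp only [List.set_cons_succ, countFalse_cons]
      have := ih i j (by simp at hi; omega) hj hg
      omega

theorem countFalse_vset (v : List (List Bool)) (x y : Int) (hx : x.toNat < v.length)
    (hy : y.toNat < (v.getD x.toNat []).length) (hg : vget v x y = false) :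
    countFalse (vset v x y) + 1 = countFalse v :=
  countFalse_setrow v x.toNat y.toNat hx hy hg

theorem shapeV_vset (n m : Int) (v : List (List Bool)) (x y : Int) (h : shapeV n m v) :
    shapeV n m (vset v x y) := by
  obtain ⟨h1, h2⟩ := h
  refine ⟨by simp [vset, h1], ?_⟩
  intro r hr
  by_cases hx : x.toNat < v.length
  · rcases List.mem_or_eq_of_mem_set hr with h | h
    · exact h2 r h
    · subst h
      rw [List.length_set]
      exact h2 _ (List.getD_eq_getElem v [] hx ▸ List.getElem_mem hx)
  · rw [vset, List.set_eq_of_length_le (by omega)] at hr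
    exact h2 r hr

theorem nextMoves_inRange (n m x y : Int) : ∀ p ∈ nextMoves n m x y,
    0 ≤ p.1 ∧ p.1 < n ∧ 0 ≤ p.2 ∧ p.2 < m := by
  intro p hp
  simp only [nextMoves, List.mem_filter, Bool.and_eq_true, decide_eq_true_eq] at hp
  tauto

theorem expandList_meas (n m : Int) : ∀ (ms : List (Int × Int)),
    (∀ p ∈ ms, 0 ≤ p.1 ∧ p.1 < n ∧ 0 ≤ p.2 ∧ p.2 < m) → ∀ v, shapeV n m v →
    shapeV n m (expandList ms v).2 ∧
      countFalse (expandList ms v).2 + (expandList ms v).1.length = countFalse v := by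
  intro ms
  induction ms with
  | nil => intro _ v hv; simpa [expandList] using hv
  | cons np ms ih =>
    intro hms v hv
    by_cases h : vget v np.1 np.2 = true
    · simpa [expandList, h] using ih (fun p hp => hms p (by simp [hp])) v hv
    · simp only [Bool.not_eq_true] at h
      have hin := hms np (by simp)
      have hx : np.1.toNat < v.length := by obtain ⟨hl, _⟩ := hv; omega
      have hy : np.2.toNat < (v.getD np.1.toNat []).length := by
        obtain ⟨hl, hr⟩ := hv
        rw [hr _ (List.getD_eq_getElem v [] hx ▸ List.getElem_mem hx)]
        omega
      have hc := countFalse_vset v np.1 np.2 hx hy h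
      have hrec := ih (fun p hp => hms p (by simp [hp])) (vset v np.1 np.2)
        (shapeV_vset n m v np.1 np.2 hv)
      simp only [expandList, h, Bool.false_eq_true, if_false]
      refine ⟨hrec.1, ?_⟩
      simp only [List.length_cons]
      omega

theorem expandFrontier_meas (n m : Int) : ∀ (L : List (Int × Int)) (v : List (List Bool)), shapeV n m v →
    shapeV n m (expandFrontier n m L v).2 ∧
      countFalse (expandFrontier n m L v).2 + (expandFrontier n m L v).1.length = countFalse v := by
  intro L
  induction L with
  | nil => intro v hv; simpa [expandFrontier] using hv
  | cons p L ih =>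
    intro v hv
    have h1 := expandList_meas n m (nextMoves n m p.1 p.2) (nextMoves_inRange n m p.1 p.2) v hv
    have h2 := ih (expandList (nextMoves n m p.1 p.2) v).2 h1.1
    simp only [expandFrontier]
    refine ⟨h2.1, ?_⟩
    simp only [List.length_append]
    omega


-- the heart: A's deque BFS and B's level BFS agree level by level
theorem bfs_main (n m : Int) : ∀ (k : Nat) (v : List (List Bool)) (L : List (Int × Int)) (d : Int) (fa fb : Nat),
    countFalse v < k → shapeV n m v → countFalse v + L.length ≤ fa → countFalse v < fb →
    bfsB n m fb L v d (countFalse v : Int)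
      = ((bfsA n m fa (L.map (fun p => (d, p.1, p.2))) v d).2,
         ((countFalse (bfsA n m fa (L.map (fun p => (d, p.1, p.2))) v d).1 : Int))) := by
  intro k
  induction k with
  | zero => intro v L d fa fb hk; omega
  | succ k ih =>
    intro v L d fa fb hk hs hfa hfb
    obtain ⟨fb', rfl⟩ : ∃ x, fb = x + 1 := ⟨fb - 1, by omega⟩
    cases L with
    | nil => cases fa <;> simp [bfsA, bfsB]
    | cons p L' =>
      have hlev := bfsA_level n m (p :: L') fa [] v d
        (by simp only [List.length_cons] at hfa ⊢; omega)
      have hmeas := expandFrontier_meas n m (p :: L') v hs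
      simp only [List.map_nil, List.append_nil, List.nil_append, reduceIte] at hlev
      simp only [bfsB]
      rw [foldBF_eq]
      simp only [List.nil_append]
      rcases hF : (expandFrontier n m (p :: L') v).1 with _ | ⟨q, Q⟩
      · rw [hF] at hlev hmeas
        simp only [List.map_nil, reduceIte] at hlev
        simp only [hF, List.length_nil]
        rw [hlev]
        have hstop : ∀ g : Nat, bfsA n m g ([] : List (Int × Int × Int))
            (expandFrontier n m (p :: L') v).2 d = ((expandFrontier n m (p :: L') v).2, d) := by
          intro g; cases g <;> simp [bfsA]
        rw [hstop]
        simp only [List.length_nil, Nat.add_zero] at hmeas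
        simp [hmeas.2]
      · rw [hF] at hlev hmeas
        simp only [List.cons_ne_nil, if_neg, ite_false, reduceCtorEq] at hlev
        simp only [hF]
        have hu : (countFalse v : Int) - ((q :: Q).length : Int)
            = (countFalse (expandFrontier n m (p :: L') v).2 : Int) := by
          have := hmeas.2; push_cast; omega
        rw [hlev, hu]
        exact ih (expandFrontier n m (p :: L') v).2 (q :: Q) (d + 1) (fa - (p :: L').length) fb'
          (by have h2 := hmeas.2; simp only [List.length_cons] at h2 hfa ⊢; omega) hmeas.1
          (by have h2 := hmeas.2; simp only [List.length_cons] at h2 hfa ⊢; omega)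
          (by have h2 := hmeas.2; simp only [List.length_cons] at h2 hfa ⊢; omega)


theorem set_at_append {α : Type} (b : α) : ∀ (A : List α) (R : List α), R ≠ [] →
    (A ++ R).set A.length b = A ++ b :: R.tail := by
  intro A
  induction A with
  | nil =>
    intro R hR
    cases R with
    | nil => simp at hR
    | cons r t => simp
  | cons a A ih => intro R hR; simp [List.set_cons_succ, ih R hR]

-- A's inner init loop over one row: sets row i cell by cell and queues the ripe cells
theorem initA_inner (m : Int) (grid : List (List Int)) (i : Int) :
    ∀ (bn : Nat), (bn : Int) ≤ m → ∀ (v : List (List Bool)) (q : List (Int × Int × Int)),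
    i.toNat < v.length → v.getD i.toNat [] = List.replicate m.toNat false →
    (PySem.List.pyRange 0 (bn : Int) 1).foldl
      (fun (st : List (List Bool) × List (Int × Int × Int)) j =>
        if cellAt grid i j == -1 then (vset st.1 i j, st.2)
        else if cellAt grid i j == 1 then (vset st.1 i j, st.2 ++ [(0, i, j)])
        else st) (v, q)
    = (v.set i.toNat
        ((PySem.List.pyRange 0 (bn : Int) 1).map
            (fun j => cellAt grid i j == 1 || cellAt grid i j == -1)
          ++ List.replicate (m.toNat - bn) false),
       q ++ ((PySem.List.pyRange 0 (bn : Int) 1).filter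
            (fun j => cellAt grid i j == 1)).map (fun j => ((0 : Int), i, j))) := by
  intro bn
  induction bn with
  | zero =>
    intro _ v q hi hrow
    simp only [Nat.cast_zero, PySem.List.pyRange_one_eq_nil (by omega : (0:Int) ≤ 0),
      List.foldl_nil, List.map_nil, List.filter_nil, List.nil_append, List.append_nil,
      Nat.sub_zero]
    rw [← hrow, List.getD_eq_getElem v [] hi, List.set_getElem_self]
  | succ bn ih =>
    intro hbn v q hi hrow
    have hb0 : (0:Int) ≤ (bn : Int) := by positivity
    have hmn : bn + 1 ≤ m.toNat := by omega
    have hcast : ((bn + 1 : Nat) : Int) = (bn : Int) + 1 := by push_cast; ring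
    rw [hcast, PySem.List.pyRange_one_succ_right hb0, List.foldl_append, List.foldl_cons,
      List.foldl_nil, ih (by omega) v q hi hrow]
    have hlenA : ((PySem.List.pyRange 0 (bn : Int) 1).map
        (fun j => cellAt grid i j == 1 || cellAt grid i j == -1)).length = bn := by
      simp [PySem.List.length_pyRange_one]
    have hgetrow : (v.set i.toNat
        ((PySem.List.pyRange 0 (bn : Int) 1).map
            (fun j => cellAt grid i j == 1 || cellAt grid i j == -1)
          ++ List.replicate (m.toNat - bn) false)).getD i.toNat []
        = ((PySem.List.pyRange 0 (bn : Int) 1).map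
            (fun j => cellAt grid i j == 1 || cellAt grid i j == -1)
          ++ List.replicate (m.toNat - bn) false) := by
      rw [List.getD_eq_getElem _ [] (by simpa using hi), List.getElem_set_self (by simpa using hi)]
    have hsetrow : ∀ b : Bool,
        (((PySem.List.pyRange 0 (bn : Int) 1).map
            (fun j => cellAt grid i j == 1 || cellAt grid i j == -1)
          ++ List.replicate (m.toNat - bn) false)).set bn b
        = ((PySem.List.pyRange 0 (bn : Int) 1).map
            (fun j => cellAt grid i j == 1 || cellAt grid i j == -1)
          ++ b :: List.replicate (m.toNat - (bn + 1)) false) := by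
      intro b
      have hrep : m.toNat - bn = (m.toNat - (bn + 1)) + 1 := by omega
      have hne : List.replicate (m.toNat - bn) false ≠ [] := by
        rw [hrep, List.replicate_succ]; simp
      have h2 := set_at_append b ((PySem.List.pyRange 0 (bn : Int) 1).map
        (fun j => cellAt grid i j == 1 || cellAt grid i j == -1))
        (List.replicate (m.toNat - bn) false) hne
      rw [hlenA] at h2
      rw [h2, hrep, List.replicate_succ]
      simp
    by_cases hc1 : (cellAt grid i (bn : Int) == -1) = true
    · have hc2 : (cellAt grid i (bn : Int) == 1) = false := by
        simp only [beq_iff_eq] at hc1; simp [hc1]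
      simp only [hc1, if_true]
      simp only [vset, hgetrow, Int.toNat_natCast, List.set_set, hsetrow]
      simp [hc1, hc2, List.filter_cons, List.append_assoc]
    · by_cases hc2 : (cellAt grid i (bn : Int) == 1) = true
      · simp only [hc1, Bool.false_eq_true, if_false, hc2, if_true]
        simp only [vset, hgetrow, Int.toNat_natCast, List.set_set, hsetrow]
        simp [hc1, hc2, List.filter_cons, List.append_assoc]
      · simp only [hc1, hc2, Bool.false_eq_true, if_false]
        have hrep : m.toNat - bn = (m.toNat - (bn + 1)) + 1 := by omega
        rw [hrep, List.replicate_succ]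
        simp [hc1, hc2, List.append_assoc]


-- A's outer init loop: row by row
theorem initA_outer (n m : Int) (grid : List (List Int)) (hm : 0 ≤ m) :
    ∀ (bn : Nat), (bn : Int) ≤ n →
    (PySem.List.pyRange 0 (bn : Int) 1).foldl
      (fun st i =>
        (PySem.List.pyRange 0 m 1).foldl
          (fun (st : List (List Bool) × List (Int × Int × Int)) j =>
            if cellAt grid i j == -1 then (vset st.1 i j, st.2)
            else if cellAt grid i j == 1 then (vset st.1 i j, st.2 ++ [(0, i, j)])
            else st) st)
      (List.replicate n.toNat (List.replicate m.toNat false), [])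
    = ((PySem.List.pyRange 0 (bn : Int) 1).map
         (fun i => (PySem.List.pyRange 0 m 1).map
            (fun j => cellAt grid i j == 1 || cellAt grid i j == -1))
        ++ List.replicate (n.toNat - bn) (List.replicate m.toNat false),
       (PySem.List.pyRange 0 (bn : Int) 1).flatMap
         (fun i => ((PySem.List.pyRange 0 m 1).filter (fun j => cellAt grid i j == 1)).map
            (fun j => ((0 : Int), i, j)))) := by
  intro bn
  induction bn with
  | zero => simp
  | succ bn ih =>
    intro hbn
    have hb0 : (0:Int) ≤ (bn : Int) := by positivity
    have hcast : ((bn + 1 : Nat) : Int) = (bn : Int) + 1 := by push_cast; ring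
    have hbnn : bn + 1 ≤ n.toNat := by omega
    rw [hcast, PySem.List.pyRange_one_succ_right hb0, List.foldl_append, List.foldl_cons,
      List.foldl_nil, ih (by omega)]
    have hlenA : ((PySem.List.pyRange 0 (bn : Int) 1).map
        (fun i => (PySem.List.pyRange 0 m 1).map
          (fun j => cellAt grid i j == 1 || cellAt grid i j == -1))).length = bn := by
      simp [PySem.List.length_pyRange_one]
    have hrepn : n.toNat - bn = (n.toNat - (bn + 1)) + 1 := by omega
    have hv : ((bn : Int)).toNat < (((PySem.List.pyRange 0 (bn : Int) 1).map
        (fun i => (PySem.List.pyRange 0 m 1).map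
          (fun j => cellAt grid i j == 1 || cellAt grid i j == -1))
        ++ List.replicate (n.toNat - bn) (List.replicate m.toNat false))).length := by
      simp only [List.length_append, hlenA, List.length_replicate, Int.toNat_natCast]
      omega
    have hrow : (((PySem.List.pyRange 0 (bn : Int) 1).map
        (fun i => (PySem.List.pyRange 0 m 1).map
          (fun j => cellAt grid i j == 1 || cellAt grid i j == -1))
        ++ List.replicate (n.toNat - bn) (List.replicate m.toNat false))).getD
          ((bn : Int)).toNat [] = List.replicate m.toNat false := by
      rw [Int.toNat_natCast, List.getD_append_right, hlenA, Nat.sub_self,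
        hrepn, List.replicate_succ, List.getD_cons_zero]
      rw [hlenA]
    have hm' : ((m.toNat : Nat) : Int) = m := Int.toNat_of_nonneg hm
    have hinner := initA_inner m grid (bn : Int) m.toNat (by omega)
      ((PySem.List.pyRange 0 (bn : Int) 1).map
        (fun i => (PySem.List.pyRange 0 m 1).map
          (fun j => cellAt grid i j == 1 || cellAt grid i j == -1))
        ++ List.replicate (n.toNat - bn) (List.replicate m.toNat false))
      ((PySem.List.pyRange 0 (bn : Int) 1).flatMap
        (fun i => ((PySem.List.pyRange 0 m 1).filter (fun j => cellAt grid i j == 1)).map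
          (fun j => ((0 : Int), i, j)))) hv hrow
    rw [hm'] at hinner
    rw [hinner]
    have hset := set_at_append ((PySem.List.pyRange 0 m 1).map
        (fun j => cellAt grid (bn : Int) j == 1 || cellAt grid (bn : Int) j == -1)
        ++ List.replicate (m.toNat - m.toNat) false)
      ((PySem.List.pyRange 0 (bn : Int) 1).map
        (fun i => (PySem.List.pyRange 0 m 1).map
          (fun j => cellAt grid i j == 1 || cellAt grid i j == -1)))
      (List.replicate (n.toNat - bn) (List.replicate m.toNat false))
      (by rw [hrepn, List.replicate_succ]; simp)
    rw [hlenA] at hset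
    rw [Int.toNat_natCast, hset, hrepn, List.replicate_succ]
    simp [List.append_assoc]

-- per-row: count of unseen = count of cells that are neither ripe nor wall
theorem count_false_map_pred (pred : Int → Bool) : ∀ l : List Int,
    (l.map pred).count false = (l.filter (fun j => !pred j)).length := by
  intro l
  induction l with
  | nil => simp
  | cons a t ih =>
    by_cases hp : pred a = true <;> simp [hp, ih]

theorem unripe_eq (n m : Int) (grid : List (List Int)) :
    unripeInit n m grid = (countFalse (seenInit n m grid) : Int) := by
  unfold unripeInit seenInit countFalse
  rw [Nat.cast_list_sum, List.map_map, List.map_map]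
  refine congrArg List.sum (List.map_congr_left ?_)
  intro i _
  simp only [Function.comp]
  rw [count_false_map_pred]

theorem shape_seenInit (n m : Int) (grid : List (List Int)) :
    shapeV n m (seenInit n m grid) := by
  constructor
  · simp [seenInit, PySem.List.length_pyRange_one]
  · intro r hr
    simp only [seenInit, List.mem_map] at hr
    obtain ⟨i, _, rfl⟩ := hr
    simp [PySem.List.length_pyRange_one]

theorem allAll_countFalse : ∀ (v : List (List Bool)),
    (v.all fun row => row.all id) = true ↔ countFalse v = 0 := by
  intro v
  induction v with
  | nil => simp [countFalse]
  | cons r t ih =>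
    simp only [List.all_cons, Bool.and_eq_true, countFalse_cons, ih, Nat.add_eq_zero_iff]
    constructor
    · rintro ⟨h1, h2⟩
      refine ⟨?_, h2⟩
      rw [List.count_eq_zero]
      intro hmem
      have := (List.all_eq_true.mp h1) false hmem
      simp at this
    · rintro ⟨h1, h2⟩
      refine ⟨?_, h2⟩
      rw [List.all_eq_true]
      intro b hb
      cases b
      · exact absurd hb (List.count_eq_zero.mp h1)
      · rfl


-- A's whole init phase equals B's three comprehensions (ripe cells tagged with depth 0)
theorem initA_eq (n m : Int) (grid : List (List Int)) :
    (PySem.List.pyRange 0 n 1).foldl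
      (fun st i =>
        (PySem.List.pyRange 0 m 1).foldl
          (fun (st : List (List Bool) × List (Int × Int × Int)) j =>
            if cellAt grid i j == -1 then (vset st.1 i j, st.2)
            else if cellAt grid i j == 1 then (vset st.1 i j, st.2 ++ [(0, i, j)])
            else st) st)
      (List.replicate n.toNat (List.replicate m.toNat false), [])
    = (seenInit n m grid, (frontInit n m grid).map (fun p => ((0 : Int), p.1, p.2))) := by
  by_cases hn : 0 ≤ n
  · by_cases hm : 0 ≤ m
    · have hn' : ((n.toNat : Nat) : Int) = n := Int.toNat_of_nonneg hn
      have h := initA_outer n m grid hm n.toNat (by omega)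
      rw [hn'] at h
      rw [h]
      unfold seenInit frontInit
      simp [List.map_flatMap, List.map_map, Function.comp_def]
    · -- m < 0: the inner loop body never runs, nothing is set or queued
      have hm0 : PySem.List.pyRange 0 m 1 = [] :=
        PySem.List.pyRange_one_eq_nil (by omega)
      have hfold : ∀ (l : List Int) (st : List (List Bool) × List (Int × Int × Int)),
          l.foldl (fun st i =>
            (PySem.List.pyRange 0 m 1).foldl
              (fun (st : List (List Bool) × List (Int × Int × Int)) j =>
                if cellAt grid i j == -1 then (vset st.1 i j, st.2)
                else if cellAt grid i j == 1 then (vset st.1 i j, st.2 ++ [(0, i, j)])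
                else st) st) st = st := by
        intro l
        induction l with
        | nil => intro st; rfl
        | cons a t ih =>
          intro st
          rw [List.foldl_cons]
          have hstep : (PySem.List.pyRange 0 m 1).foldl
              (fun (st : List (List Bool) × List (Int × Int × Int)) j =>
                if cellAt grid a j == -1 then (vset st.1 a j, st.2)
                else if cellAt grid a j == 1 then (vset st.1 a j, st.2 ++ [(0, a, j)])
                else st) st = st := by rw [hm0]; rfl
          rw [hstep]
          exact ih st
      rw [hfold]
      have hmt : m.toNat = 0 := by omega
      unfold seenInit frontInit
      rw [hm0, hmt]
      have hconst : ∀ l : List Int, l.map (fun _ => ([] : List Bool)) = List.replicate l.length [] := by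
        intro l; induction l with
        | nil => rfl
        | cons a t ih => simp [ih, List.replicate_succ]
      have hflat : ∀ l : List Int, (l.flatMap (fun _ => ([] : List (Int × Int)))) = [] := by
        intro l; induction l with
        | nil => rfl
        | cons a t ih => simp [ih]
      simp only [List.map_nil, List.filter_nil, List.replicate_zero]
      rw [hconst, hflat]
      simp [PySem.List.length_pyRange_one]
  · have hn0 : PySem.List.pyRange 0 n 1 = [] :=
      PySem.List.pyRange_one_eq_nil (by omega)
    have hnt : n.toNat = 0 := by omega
    unfold seenInit frontInit
    rw [hn0, hnt]
    simp

theorem solution_spec : Claim_equal_solution := by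
  intro n m grid _ _
  unfold Spec_solution solution solution_alt
  rw [initA_eq n m grid]
  simp only []
  rw [unripe_eq n m grid]
  have hmain := bfs_main n m (countFalse (seenInit n m grid) + 1) (seenInit n m grid)
    (frontInit n m grid) 0
    (((frontInit n m grid).map (fun p => ((0 : Int), p.1, p.2))).length
      + countFalse (seenInit n m grid))
    (countFalse (seenInit n m grid) + 1)
    (by omega) (shape_seenInit n m grid)
    (by rw [List.length_map]; omega) (by omega)
  rw [hmain]
  simp only []
  refine if_congr ?_ rfl rfl
  rw [allAll_countFalse]
  simp [Int.natCast_eq_zero]
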